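-- pv_equiv track=rewrite | github.com/Fafer77/leetcode | easy/1752.py | check
-- ===== SOURCE A (Python) =====
-- from typing import List
--
-- def check(nums: List[int]) -> bool:
--     mini = min(nums)
--     idx_list = [i for i, val in enumerate(nums) if val == mini]
--     n = len(nums)
--     fails = 0
--     for index in idx_list:
--         idx = index
--         prev = nums[idx]
--         for _ in range(1, n):
--             idx = (idx + 1) % n
--             if prev > nums[idx]:
--                 fails += 1
--                 break
--             prev = nums[idx]
--
--     if fails == len(idx_list):
--         return False
--     return True
-- ===== SOURCE B (Python) =====
-- def check(nums):
--     drops = 0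
--     for a, b in zip(nums, nums[1:] + nums[:1]):
--         if a > b:
--             drops += 1
--     return drops <= 1
-- ===== Notes on version B (the rewrite author's own statement) =====
-- stated objective: faster
-- what changed: Instead of simulating a full n-step traversal from every index holding the minimum value, B makes one pass counting circular adjacent drops (nums[i] > nums[(i+1)%n]) and accepts iff there is at most one.
-- outside the precondition, e.g. on check([]): A raises ValueError, B returns True
-- crash fix: On the empty list A raises ValueError (min of empty sequence); B returns True. — e.g. on check([]): A raises ValueError, B returns true
import Mathlib
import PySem

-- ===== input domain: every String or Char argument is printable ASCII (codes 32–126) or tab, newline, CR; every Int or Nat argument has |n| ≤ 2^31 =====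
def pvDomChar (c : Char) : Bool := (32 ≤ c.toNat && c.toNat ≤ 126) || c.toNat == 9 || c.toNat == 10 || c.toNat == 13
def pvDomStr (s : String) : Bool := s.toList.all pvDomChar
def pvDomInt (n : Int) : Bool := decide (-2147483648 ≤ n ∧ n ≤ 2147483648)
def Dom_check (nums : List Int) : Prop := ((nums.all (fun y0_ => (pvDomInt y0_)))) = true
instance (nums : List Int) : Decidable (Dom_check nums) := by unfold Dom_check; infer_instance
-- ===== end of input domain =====

-- B replaces A's per-minimum-index full traversals by one pass counting circular adjacent drops (faster; A raises on [], excluded by Pre_, where B returns True).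


-- ===== PORT A =====
-- inner 'for _ in range(1, n)' loop with its break, as structural recursion on the remaining count
def checkInner (nums : List Int) (n : Int) : Nat → Int → Int → Bool
  | 0, _, _ => false
  | m + 1, idx, prev =>
    let idx' := PySem.Int.mod (idx + 1) n
    let cur := PySem.List.pyGetD nums idx' 0   -- nums[idx]: idx' is always in range here
    if prev > cur then true
    else checkInner nums n m idx' cur

def check (nums : List Int) : Bool :=
  match PySem.List.min? nums (fun x => x) with
  | none => false   -- Python raises ValueError here (empty list); excluded by Pre_check
  | some mini =>
    let idxList := ((PySem.List.enumerate nums 0).filter (fun p => p.2 == mini)).map (·.1)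
    let n : Int := nums.length
    let fails : Int := idxList.foldl (fun fails index =>
      if checkInner nums n (n - 1).toNat index (PySem.List.pyGetD nums index 0) then fails + 1
      else fails) 0
    if fails == (idxList.length : Int) then false else true

-- ===== PORT B =====
def check_alt (nums : List Int) : Bool :=
  let shifted := PySem.List.slice nums (some 1) none ++ PySem.List.slice nums none (some 1)  -- nums[1:] + nums[:1]
  let drops : Int := (nums.zip shifted).foldl (fun acc p => if p.1 > p.2 then acc + 1 else acc) 0
  decide (drops ≤ 1)

-- ===== PRECONDITION & SPEC =====
-- Pre_ excludes only the empty list, on which A raises ValueError (min of an empty sequence).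
def Pre_check (nums : List Int) : Prop := nums ≠ []
instance (nums : List Int) : Decidable (Pre_check nums) := by unfold Pre_check; infer_instance
def pvWitness_check : List Int := ([3, 4, 5, 1, 2])

-- On the empty list A raises ValueError (min of empty sequence); B returns True.
def Raises_check (nums : List Int) : Prop := nums = []
instance (nums : List Int) : Decidable (Raises_check nums) := by unfold Raises_check; infer_instance
def pvRaiseWitness_check : List Int := ([])
def pvRaiseWitnessOut_check : Bool := true

def Spec_check (nums : List Int) (out : Bool) : Prop := out = check_alt nums
instance (nums : List Int) (out : Bool) : Decidable (Spec_check nums out) := by unfold Spec_check; infer_instance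

-- ===== CLAIM (what is proved, stated in full; the proofs are below) =====
def Claim_equal_check : Prop := ∀ (nums : List Int), Dom_check nums → Pre_check nums → Spec_check nums (check nums)
def Claim_raises_check : Prop := (∀ (nums : List Int), Dom_check nums → Raises_check nums → ¬ Pre_check nums) ∧ (Dom_check (pvRaiseWitness_check) ∧ Raises_check (pvRaiseWitness_check) ∧ check_alt (pvRaiseWitness_check) = pvRaiseWitnessOut_check)

-- ===== LEMMAS AND PROOFS =====

-- value at a (Nat) index; dB j decides a "circular drop" at j
def gg (nums : List Int) (j : Nat) : Int := nums.getD j 0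
def dB (nums : List Int) (j : Nat) : Bool := decide (gg nums ((j + 1) % nums.length) < gg nums j)

theorem inner_spec (nums : List Int) (hne : nums ≠ []) (m : Nat) (j : Nat) (hj : j < nums.length) :
    (checkInner nums (nums.length : Int) m (j : Int) (gg nums j) = true ↔
      ∃ k < m, dB nums ((j + k) % nums.length) = true) := by
  have hn : 0 < nums.length := List.length_pos_of_ne_nil hne
  induction m generalizing j with
  | zero => simp [checkInner]
  | succ m ih =>
    have hj' : (j + 1) % nums.length < nums.length := Nat.mod_lt _ hn
    have hmod : PySem.Int.mod ((j : Int) + 1) (nums.length : Int) = (((j + 1) % nums.length : Nat) : Int) := by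
      rw [PySem.Int.mod_eq_emod_of_pos (by exact_mod_cast hn)]
      push_cast
      ring
    simp only [checkInner, hmod, PySem.List.pyGetD_natCast]
    by_cases hgt : nums.getD ((j + 1) % nums.length) 0 < nums.getD j 0
    · rw [if_pos (by simpa [gg] using hgt)]
      constructor
      · intro _
        refine ⟨0, by omega, ?_⟩
        simp only [Nat.add_zero, Nat.mod_eq_of_lt hj, dB, gg, decide_eq_true_eq]
        exact hgt
      · intro _; rfl
    · rw [if_neg (by simpa [gg] using hgt)]
      have hrec := ih ((j + 1) % nums.length) hj'
      simp only [gg] at hrec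
      refine hrec.trans ?_
      have hshift : ∀ k, ((j + 1) % nums.length + k) % nums.length = (j + (k + 1)) % nums.length := by
        intro k; rw [Nat.mod_add_mod]; congr 1; omega
      constructor
      · rintro ⟨k, hk, hd⟩
        exact ⟨k + 1, by omega, by rwa [hshift] at hd⟩
      · rintro ⟨k, hk, hd⟩
        cases k with
        | zero =>
          exfalso
          apply hgt
          have : dB nums j = true := by simpa [Nat.mod_eq_of_lt hj] using hd
          simpa [dB, gg] using this
        | succ k =>
          exact ⟨k, by omega, by rwa [hshift]⟩

theorem zip_shift (nums : List Int) (hne : nums ≠ []) :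
    nums.zip (nums.drop 1 ++ nums.take 1) =
      (List.range nums.length).map (fun i => (gg nums i, gg nums ((i + 1) % nums.length))) := by
  have hn : 0 < nums.length := List.length_pos_of_ne_nil hne
  apply List.ext_getElem
  · simp; omega
  · intro i h1 h2
    have hi : i < nums.length := by simpa using h2
    have hlen : (nums.drop 1 ++ nums.take 1).length = nums.length := by simp; omega
    rw [List.getElem_zip, List.getElem_map, List.getElem_range]
    have h2' : gg nums i = nums[i] := List.getD_eq_getElem nums 0 hi
    by_cases hc : i < nums.length - 1
    · have : (nums.drop 1 ++ nums.take 1)[i] = nums[1 + i] := by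
        rw [List.getElem_append_left (by simp; omega)]
        exact List.getElem_drop ..
      rw [this]
      have hmm : (i + 1) % nums.length = i + 1 := Nat.mod_eq_of_lt (by omega)
      simp only [hmm, gg]
      rw [List.getD_eq_getElem nums 0 hi, List.getD_eq_getElem nums 0 (show i + 1 < nums.length by omega)]
      have : nums[1 + i] = nums[i + 1] := by congr 1; omega
      rw [this]
    · have hi' : i = nums.length - 1 := by omega
      have : (nums.drop 1 ++ nums.take 1)[i] = nums[0] := by
        rw [List.getElem_append_right (by simp; omega)]
        simp [hi']
      rw [this]
      have hmm : (i + 1) % nums.length = 0 := by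
        rw [show i + 1 = nums.length by omega]
        exact Nat.mod_self _
      simp only [hmm, gg]
      rw [List.getD_eq_getElem nums 0 hi, List.getD_eq_getElem nums 0 hn]

theorem check_alt_eq (nums : List Int) (hne : nums ≠ []) :
    check_alt nums =
      decide ((List.range nums.length).countP (fun i => dB nums i) ≤ 1) := by
  have hslice1 : PySem.List.slice nums (some 1) none = nums.drop 1 := by
    rw [PySem.List.slice_from_one, List.drop_one]
  have hslice2 : PySem.List.slice nums none (some 1) = nums.take 1 := by
    simp [pysem]
  unfold check_alt
  simp only [hslice1, hslice2]
  rw [PySem.List.foldl_ite_add_one (fun p : Int × Int => p.1 > p.2)]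
  rw [zip_shift nums hne, List.countP_map]
  simp only [decide_eq_decide]
  have : ((fun p : Int × Int => decide (p.1 > p.2)) ∘
      (fun i => (gg nums i, gg nums ((i + 1) % nums.length)))) = fun i => dB nums i := by
    funext i; simp [dB, gt_iff_lt]
  rw [this]
  omega

theorem cycle_index (n s t : Nat) (hn : 0 < n) (hs : s < n) (ht : t < n) :
    ∃ k < n, (s + k) % n = t := by
  refine ⟨(t + n - s) % n, Nat.mod_lt _ hn, ?_⟩
  have h1 : (s + (t + n - s) % n) % n = (s + (t + n - s)) % n := by
    conv_lhs => rw [Nat.add_mod]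
    conv_rhs => rw [Nat.add_mod]
    rw [Nat.mod_mod_of_dvd _ dvd_rfl]
  rw [h1, show s + (t + n - s) = t + n by omega, Nat.add_mod_right, Nat.mod_eq_of_lt ht]

theorem chain_le (nums : List Int) (s : Nat) (hs : s < nums.length)
    (h : ¬ ∃ k < nums.length - 1, dB nums ((s + k) % nums.length) = true) :
    ∀ k ≤ nums.length - 1, gg nums s ≤ gg nums ((s + k) % nums.length) := by
  have hn : 0 < nums.length := by omega
  intro k hk
  induction k with
  | zero => rw [Nat.add_zero, Nat.mod_eq_of_lt hs]
  | succ k ih =>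
    refine le_trans (ih (by omega)) ?_
    have hnd : ¬ dB nums ((s + k) % nums.length) = true := fun hd => h ⟨k, by omega, hd⟩
    simp only [dB, decide_eq_true_eq, not_lt] at hnd
    rwa [Nat.mod_add_mod] at hnd

theorem main_equiv (nums : List Int) (hne : nums ≠ []) :
    ((∃ s < nums.length, (∀ x ∈ nums, gg nums s ≤ x) ∧
        ¬ ∃ k < nums.length - 1, dB nums ((s + k) % nums.length) = true) ↔
      (List.range nums.length).countP (fun i => dB nums i) ≤ 1) := by
  have hn : 0 < nums.length := List.length_pos_of_ne_nil hne
  constructor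
  · rintro ⟨s, hs, _, hnof⟩
    have hkey : ∀ j ∈ List.range nums.length, dB nums j = true →
        (j == (s + (nums.length - 1)) % nums.length) = true := by
      intro j hj hd
      rw [List.mem_range] at hj
      simp only [beq_iff_eq]
      by_contra hne'
      obtain ⟨k, hk, hks⟩ := cycle_index nums.length s j hn hs hj
      have hk' : k ≠ nums.length - 1 := fun he => hne' (by rw [← hks, he])
      exact hnof ⟨k, by omega, by rwa [hks]⟩
    calc (List.range nums.length).countP (fun i => dB nums i)
        ≤ (List.range nums.length).countP (fun i => i == (s + (nums.length - 1)) % nums.length) :=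
          List.countP_mono_left hkey
      _ = (List.range nums.length).count ((s + (nums.length - 1)) % nums.length) := rfl
      _ ≤ 1 := List.nodup_iff_count_le_one.mp (List.nodup_range) _
  · intro hcnt
    -- at most one drop index
    have huniq : ∀ j j', j < nums.length → j' < nums.length →
        dB nums j = true → dB nums j' = true → j = j' := by
      intro j j' hj hj' hd hd'
      have hmj : j ∈ (List.range nums.length).filter (fun i => dB nums i) := by
        simp [List.mem_filter, List.mem_range, hj, hd]
      have hmj' : j' ∈ (List.range nums.length).filter (fun i => dB nums i) := by
        simp [List.mem_filter, List.mem_range, hj', hd']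
      have hlen : ((List.range nums.length).filter (fun i => dB nums i)).length ≤ 1 := by
        rw [← List.countP_eq_length_filter]; exact hcnt
      match hf : (List.range nums.length).filter (fun i => dB nums i) with
      | [] => rw [hf] at hmj; simp at hmj
      | [a] => rw [hf] at hmj hmj'; simp at hmj hmj'; omega
      | a :: b :: t => rw [hf] at hlen; simp at hlen
    -- minimum element with its index
    obtain ⟨mv, hmv, hmvmin⟩ : ∃ b ∈ nums, ∀ b' ∈ nums, b ≤ b' := by
      obtain ⟨m, hm⟩ := Option.ne_none_iff_exists'.mp
        ((PySem.List.min?_eq_none_iff nums (fun x => x)).not.mpr hne)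
      exact ⟨m, PySem.List.min?_mem hm, PySem.List.min?_isMin hm⟩
    by_cases hdrop : ∃ j < nums.length, dB nums j = true
    · obtain ⟨j, hj, hdj⟩ := hdrop
      refine ⟨(j + 1) % nums.length, Nat.mod_lt _ hn, ?_, ?_⟩
      · -- minimality via the chain from (j+1)%n
        have hnof : ¬ ∃ k < nums.length - 1, dB nums (((j + 1) % nums.length + k) % nums.length) = true := by
          rintro ⟨k, hk, hd⟩
          have heq : ((j + 1) % nums.length + k) % nums.length = j :=
            huniq _ _ (Nat.mod_lt _ hn) hj hd hdj
          rw [Nat.mod_add_mod] at heq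
          have : (j + (1 + k)) % nums.length = (j + 0) % nums.length := by
            rw [show j + 1 + k = j + (1 + k) by omega] at heq
            rw [heq, Nat.add_zero, Nat.mod_eq_of_lt hj]
          have h10 : (1 + k) % nums.length = 0 % nums.length := Nat.ModEq.add_left_cancel' j this
          have : nums.length ∣ (1 + k) := Nat.dvd_of_mod_eq_zero (by simpa using h10)
          have := Nat.le_of_dvd (by omega) this
          omega
        have hchain := chain_le nums ((j + 1) % nums.length) (Nat.mod_lt _ hn) hnof
        intro x hx
        obtain ⟨t, ht, hxt⟩ := List.mem_iff_getElem.mp hx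
        obtain ⟨k, hk, hks⟩ := cycle_index nums.length ((j + 1) % nums.length) t hn (Nat.mod_lt _ hn) ht
        have := hchain k (by omega)
        rw [hks] at this
        simp only [gg] at this ⊢
        rwa [List.getD_eq_getElem nums 0 ht, hxt] at this
      · rintro ⟨k, hk, hd⟩
        have heq : ((j + 1) % nums.length + k) % nums.length = j :=
          huniq _ _ (Nat.mod_lt _ hn) hj hd hdj
        rw [Nat.mod_add_mod] at heq
        have : (j + (1 + k)) % nums.length = (j + 0) % nums.length := by
          rw [show j + 1 + k = j + (1 + k) by omega] at heq
          rw [heq, Nat.add_zero, Nat.mod_eq_of_lt hj]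
        have h10 : (1 + k) % nums.length = 0 % nums.length := Nat.ModEq.add_left_cancel' j this
        have : nums.length ∣ (1 + k) := Nat.dvd_of_mod_eq_zero (by simpa using h10)
        have := Nat.le_of_dvd (by omega) this
        omega
    · push_neg at hdrop
      obtain ⟨t, ht, hxt⟩ := List.mem_iff_getElem.mp hmv
      refine ⟨t, ht, ?_, ?_⟩
      · intro x hx
        rw [gg, List.getD_eq_getElem nums 0 ht, hxt]
        exact hmvmin x hx
      · rintro ⟨k, hk, hd⟩
        exact absurd hd (by simpa using hdrop ((t + k) % nums.length) (Nat.mod_lt _ hn))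

theorem check_eq (nums : List Int) (hne : nums ≠ []) :
    check nums =
      decide (∃ s < nums.length, (∀ x ∈ nums, gg nums s ≤ x) ∧
        ¬ ∃ k < nums.length - 1, dB nums ((s + k) % nums.length) = true) := by
  have hn : 0 < nums.length := List.length_pos_of_ne_nil hne
  obtain ⟨mini, hm⟩ := Option.ne_none_iff_exists'.mp
    ((PySem.List.min?_eq_none_iff nums (fun x => x)).not.mpr hne)
  have hminmem : mini ∈ nums := PySem.List.min?_mem hm
  have hminle : ∀ y ∈ nums, mini ≤ y := PySem.List.min?_isMin hm
  unfold check
  rw [hm]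
  apply Bool.eq_iff_iff.mpr
  simp only [decide_eq_true_eq]
  set L := ((PySem.List.enumerate nums 0).filter (fun p => p.2 == mini)).map (·.1) with hL
  set q : Int → Prop := fun index =>
    checkInner nums (nums.length : Int) (((nums.length : Int) - 1).toNat) index
      (PySem.List.pyGetD nums index 0) = true with hq
  rw [PySem.List.foldl_ite_add_one q L 0]
  have hmemL : ∀ x, x ∈ L ↔ ∃ s : Nat, ∃ hs : s < nums.length, x = (s : Int) ∧ nums[s] = mini := by
    intro x
    simp only [hL, List.mem_map, List.mem_filter, PySem.List.mem_enumerate_iff]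
    constructor
    · rintro ⟨p, ⟨⟨k, hk, hp⟩, hpm⟩, hpx⟩
      subst hp
      simp only [beq_iff_eq] at hpm
      exact ⟨k, hk, by simp [← hpx], hpm⟩
    · rintro ⟨s, hs, hx, hv⟩
      exact ⟨((s : Int), nums[s]), ⟨⟨s, hs, by simp⟩, by simp [hv]⟩, by simp [hx]⟩
  -- the if-condition
  have hcnt_le : L.countP (fun x => decide (q x)) ≤ L.length := List.countP_le_length
  have hbeq : ((0 : Int) + (L.countP (fun x => decide (q x)) : Int) == (L.length : Int)) =
      decide (L.countP (fun x => decide (q x)) = L.length) := by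
    simp only [zero_add]
    rw [show ∀ a b : Int, (a == b) = decide (a = b) from fun _ _ => rfl]
    rw [decide_eq_decide]
    exact Int.natCast_inj
  rw [hbeq]
  by_cases hall : L.countP (fun x => decide (q x)) = L.length
  · rw [decide_eq_true hall]
    refine iff_of_false (by simp) ?_
    rw [List.countP_eq_length] at hall
    rintro ⟨s, hs, hmin, hnof⟩
    have hsL : (s : Int) ∈ L := (hmemL _).mpr ⟨s, hs, rfl, by
      have h1 : mini ≤ nums[s] := hminle _ (List.getElem_mem _)
      have h2 : nums[s] ≤ mini := by
        have := hmin mini hminmem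
        rwa [gg, List.getD_eq_getElem nums 0 hs] at this
      omega⟩
    have hq' := hall _ hsL
    simp only [decide_eq_true_eq, hq] at hq'
    rw [PySem.List.pyGetD_natCast] at hq'
    rw [show (((nums.length : Int) - 1).toNat) = nums.length - 1 by omega] at hq'
    exact hnof ((inner_spec nums hne (nums.length - 1) s hs).mp hq')
  · rw [decide_eq_false hall]
    refine iff_of_true (by simp) ?_
    rw [List.countP_eq_length] at hall
    push_neg at hall
    obtain ⟨x, hxL, hxq⟩ := hall
    obtain ⟨s, hs, hxs, hsv⟩ := (hmemL x).mp hxL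
    subst hxs
    refine ⟨s, hs, ?_, ?_⟩
    · intro y hy
      rw [gg, List.getD_eq_getElem nums 0 hs, hsv]
      exact hminle y hy
    · intro hex
      apply hxq
      simp only [decide_eq_true_eq, hq]
      rw [PySem.List.pyGetD_natCast,
        show (((nums.length : Int) - 1).toNat) = nums.length - 1 by omega]
      exact (inner_spec nums hne (nums.length - 1) s hs).mpr hex

-- ===== VERDICT (by name: the statement is the Claim_ definition above) =====
theorem check_spec : Claim_equal_check := by
  intro nums _ hpre
  unfold Spec_check
  rw [check_eq nums hpre, check_alt_eq nums hpre]
  simp only [decide_eq_decide]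
  exact main_equiv nums hpre

@[simp] theorem check_raises : Claim_raises_check := by
  unfold Claim_raises_check
  exact ⟨fun nums _ h => by simp [Raises_check, Pre_check] at *; exact h, by decide⟩
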